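-- pv_equiv track=rewrite | github.com/fresho2/jeu | mecanisme.py | initialiser_mot_part_decouv
-- ===== SOURCE A (Python) =====
-- def initialiser_mot_part_decouv(mot_myst,car_subst="-"):
--     """ cette  foncion renvoie une liste contenant le mot mystere (passeé en argument) avec les caractères substiués"""
--     l=[]
--     for indice in range(len(mot_myst)):
--         if (indice == 0) or (indice == len(mot_myst)-1):
--             l.append(mot_myst[indice])
--         else:
--             l.append(car_subst)
--     return l
-- ===== SOURCE B (Python) =====
-- def initialiser_mot_part_decouv(mot_myst, car_subst="-"):
--     if not mot_myst:
--         return []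
--     if len(mot_myst) == 1:
--         return [mot_myst]
--     return [mot_myst[0]] + [car_subst] * (len(mot_myst) - 2) + [mot_myst[-1]]
-- ===== Notes on version B (the rewrite author's own statement) =====
-- stated objective: simpler
-- what changed: B has no per-index loop at all: it assembles the result as the concatenation of three segments — the first character, a replicated middle block of car_subst, and the last character — with explicit cases for empty and length-1 words.
import Mathlib
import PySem

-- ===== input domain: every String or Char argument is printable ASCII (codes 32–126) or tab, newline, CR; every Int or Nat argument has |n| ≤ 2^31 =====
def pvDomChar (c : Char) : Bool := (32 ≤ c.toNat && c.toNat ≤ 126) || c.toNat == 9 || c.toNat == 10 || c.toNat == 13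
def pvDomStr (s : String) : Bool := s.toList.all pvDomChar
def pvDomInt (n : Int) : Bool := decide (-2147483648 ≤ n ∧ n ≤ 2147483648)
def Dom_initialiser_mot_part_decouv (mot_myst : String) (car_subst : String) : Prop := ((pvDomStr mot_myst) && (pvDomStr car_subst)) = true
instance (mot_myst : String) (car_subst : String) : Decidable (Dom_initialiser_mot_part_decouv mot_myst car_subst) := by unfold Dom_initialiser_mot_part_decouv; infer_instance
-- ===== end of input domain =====

-- B replaces A's per-index loop (endpoint branch at each index) by a loop-free three-segment concatenation: first char ++ replicated middle ++ last char (simpler decomposition, same cost); proved equal on all inputs.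

-- ===== PORT A =====
def initialiser_mot_part_decouv (mot_myst : String) (car_subst : String) : List String :=
  let cs := mot_myst.toList
  (PySem.List.pyRange 0 (cs.length : Int) 1).foldl
    (fun l indice =>
      if indice = 0 ∨ indice = (cs.length : Int) - 1 then
        l ++ [String.mk [PySem.List.pyGetD cs indice ' ']]
      else
        l ++ [car_subst]) []

-- ===== PORT B =====
def initialiser_mot_part_decouv_alt (mot_myst : String) (car_subst : String) : List String :=
  match mot_myst.toList with
  | [] => []
  | [c] => [String.mk [c]]
  | c :: c2 :: rest =>
    [String.mk [c]] ++ List.replicate (mot_myst.toList.length - 2) car_subst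
      ++ [String.mk [(c2 :: rest).getLast (List.cons_ne_nil c2 rest)]]

-- ===== PRECONDITION & SPEC =====
def Spec_initialiser_mot_part_decouv (mot_myst : String) (car_subst : String) (out : List String) : Prop := out = initialiser_mot_part_decouv_alt mot_myst car_subst
instance (mot_myst : String) (car_subst : String) (out : List String) : Decidable (Spec_initialiser_mot_part_decouv mot_myst car_subst out) := by unfold Spec_initialiser_mot_part_decouv; infer_instance

-- ===== CLAIM (what is proved, stated in full; the proofs are below) =====
def Claim_equal_initialiser_mot_part_decouv : Prop := ∀ (mot_myst : String) (car_subst : String), Dom_initialiser_mot_part_decouv mot_myst car_subst → Spec_initialiser_mot_part_decouv mot_myst car_subst (initialiser_mot_part_decouv mot_myst car_subst)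

-- ===== LEMMAS AND PROOFS =====

-- A's loop, with the branch pushed inside the single append, becomes a map over the range.
theorem portA_eq_map (mot_myst : String) (car_subst : String) :
    initialiser_mot_part_decouv mot_myst car_subst
    = (PySem.List.pyRange 0 (mot_myst.toList.length : Int) 1).map (fun i =>
        if i = 0 ∨ i = (mot_myst.toList.length : Int) - 1 then
          String.mk [PySem.List.pyGetD mot_myst.toList i ' ']
        else car_subst) := by
  unfold initialiser_mot_part_decouv
  have h : ∀ (l : List String) (i : Int),
      (if i = 0 ∨ i = (mot_myst.toList.length : Int) - 1 then
        l ++ [String.mk [PySem.List.pyGetD mot_myst.toList i ' ']] else l ++ [car_subst])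
      = l ++ [if i = 0 ∨ i = (mot_myst.toList.length : Int) - 1 then
          String.mk [PySem.List.pyGetD mot_myst.toList i ' '] else car_subst] := by
    intro l i; split <;> rfl
  simp only [h, PySem.List.foldl_append_singleton_eq_map, List.nil_append]

-- ===== VERDICT (by name: the statement is the Claim_ definition above) =====
theorem initialiser_mot_part_decouv_spec : Claim_equal_initialiser_mot_part_decouv := by
  intro mot_myst car_subst _
  unfold Spec_initialiser_mot_part_decouv
  rw [portA_eq_map]
  unfold initialiser_mot_part_decouv_alt
  cases hcs : mot_myst.toList with
  | nil => simp [PySem.List.pyRange_one_eq_nil]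
  | cons c tl =>
    cases tl with
    | nil =>
      rw [show ((([c]:List Char).length : Int)) = 0 + 1 from by simp,
          PySem.List.pyRange_one_singleton]
      simp [PySem.List.pyGetD_zero_cons]
    | cons c2 rest =>
      dsimp only
      set cs : List Char := c :: c2 :: rest with hdef
      apply List.ext_getElem
      · simp [PySem.List.length_pyRange_one, hdef]
        omega
      · intro i h1 h2
        have hn : cs.length = rest.length + 2 := by simp [hdef]
        have hi : i < cs.length := by
          simp [PySem.List.length_pyRange_one] at h1
          omega
        rw [List.getElem_map, PySem.List.getElem_pyRange_one]
        have hget : PySem.List.pyGetD cs (0 + (i : Int)) ' ' = cs[i] := by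
          rw [zero_add]
          simp [pysem, List.getElem?_eq_getElem hi]
        by_cases h0 : i = 0
        · subst h0
          simp [hdef]
        · by_cases hlast : i = cs.length - 1
          · have hcond : (0 + (i : Int) = 0 ∨ 0 + (i : Int) = (cs.length : Int) - 1) := by
              right; omega
            rw [if_pos hcond, hget]
            have hlen : cs[i] = cs.getLast (by simp [hdef]) := by
              rw [List.getLast_eq_getElem]; congr 1
            rw [hlen]
            have : cs.getLast (by simp [hdef]) = (c2 :: rest).getLast (List.cons_ne_nil c2 rest) := by
              simp [hdef, List.getLast_cons]
            rw [this]
            have hge1 : (([String.mk [c]] : List String) ++ List.replicate (cs.length - 2) car_subst).length ≤ i := by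
              simp; omega
            rw [List.getElem_append_right hge1]
            simp
          · have hcond : ¬ (0 + (i : Int) = 0 ∨ 0 + (i : Int) = (cs.length : Int) - 1) := by
              omega
            rw [if_neg hcond]
            have hlt1 : i < (([String.mk [c]] : List String) ++ List.replicate (cs.length - 2) car_subst).length := by
              simp; omega
            rw [List.getElem_append_left hlt1]
            have hge1 : ([String.mk [c]] : List String).length ≤ i := by simp; omega
            rw [List.getElem_append_right hge1]
            simp
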